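-- pv_equiv track=rewrite | github.com/cjlee112/latude | info_test.py | state_from_history
-- ===== SOURCE A (Python) =====
-- def state_from_history(history):
--     n = len(history)
--     d = {}
--     for ctx in ('CC', 'CD', 'DC', 'DD'):
--         moves = [history[i + 1][1] for i in range(n - 1)
--                  if history[i] == ctx]
--         d[ctx] = (len([m for m in moves if m == 'C']), len(moves))
--     return d
-- ===== SOURCE B (Python) =====
-- def state_from_history(history):
--     d = {'CC': (0, 0), 'CD': (0, 0), 'DC': (0, 0), 'DD': (0, 0)}
--     for ctx, nxt in zip(history, history[1:]):
--         if ctx in d: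
--             c, t = d[ctx]
--             d[ctx] = (c + (nxt[1] == 'C'), t + 1)
--     return d
-- ===== Notes on version B (the rewrite author's own statement) =====
-- stated objective: simpler
-- what changed: Replaced four independent index-based filtering scans (one per context key) by a single pass over adjacent pairs (zip) that accumulates each key's (C-count, total) in one dict.
import Mathlib
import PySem

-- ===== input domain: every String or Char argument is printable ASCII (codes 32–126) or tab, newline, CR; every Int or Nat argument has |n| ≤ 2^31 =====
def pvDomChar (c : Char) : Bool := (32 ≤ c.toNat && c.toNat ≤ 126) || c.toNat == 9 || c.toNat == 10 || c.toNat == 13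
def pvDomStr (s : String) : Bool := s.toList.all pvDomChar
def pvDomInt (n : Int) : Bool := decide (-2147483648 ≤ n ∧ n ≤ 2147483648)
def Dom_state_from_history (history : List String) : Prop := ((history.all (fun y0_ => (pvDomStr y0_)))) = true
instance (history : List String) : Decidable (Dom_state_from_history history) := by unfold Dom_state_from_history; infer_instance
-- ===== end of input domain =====

-- B replaces A's four independent filtering scans (one per context key) by a single accumulating pass
-- over the adjacent pairs, keeping per-key (C-count, total) in one dict (objective: simpler).

-- ===== PORT A =====
-- literal port of A: for each of the four contexts, build the successor-move list by an index scan, then count.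
-- history[i+1][1] is ported as (pyGet? · 1).getD ' '; the default is never reached inside Pre_ (Python raises IndexError there).
def state_from_history (history : List String) : List (String × Int × Int) :=
  let n : Int := history.length
  (((["CC", "CD", "DC", "DD"] : List String).foldl
    (fun (d : PySem.Dict String (Int × Int)) ctx =>
      let moves := ((PySem.List.pyRange 0 (n - 1) 1).filter
          (fun i => PySem.List.pyGetD history i "" == ctx)).map
          (fun i => (PySem.Str.pyGet? (PySem.List.pyGetD history (i + 1) "") 1).getD ' ')
      d.insert ctx (((moves.filter (fun m => m == 'C')).length : Int), (moves.length : Int)))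
    PySem.Dict.empty)).items

-- ===== PORT B =====
-- literal port of Source B: one pass over zip(history, history[1:]) accumulating (c, t) per context key in a dict.
def state_from_history_alt (history : List String) : List (String × Int × Int) :=
  let d0 : PySem.Dict String (Int × Int) :=
    PySem.Dict.ofList [("CC", (0, 0)), ("CD", (0, 0)), ("DC", (0, 0)), ("DD", (0, 0))]
  let d := (history.zip (PySem.List.slice history (some 1) none)).foldl
    (fun (d : PySem.Dict String (Int × Int)) p =>
      if d.contains p.1 then
        let ct := d.getD p.1 (0, 0)
        d.insert p.1
          (ct.1 + (if (PySem.Str.pyGet? p.2 1).getD ' ' == 'C' then 1 else 0), ct.2 + 1)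
      else d) d0
  d.items

-- ===== PRECONDITION & SPEC =====
-- Pre_ excludes exactly the inputs where Python A raises IndexError: an element equal to one of the
-- four context keys followed (not in last position) by a string of length < 2.
def Pre_state_from_history (history : List String) : Prop :=
  ∀ p ∈ history.zip (history.drop 1),
    p.1 ∈ (["CC", "CD", "DC", "DD"] : List String) → 2 ≤ p.2.toList.length
instance (history : List String) : Decidable (Pre_state_from_history history) := by
  unfold Pre_state_from_history; infer_instance

def pvWitness_state_from_history : List String := ["CC", "CD", "DD", "DC", "CC", "xx"]

def Spec_state_from_history (history : List String) (out : List (String × Int × Int)) : Prop := out = state_from_history_alt history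
instance (history : List String) (out : List (String × Int × Int)) : Decidable (Spec_state_from_history history out) := by unfold Spec_state_from_history; infer_instance

-- ===== CLAIM (what is proved, stated in full; the proofs are below) =====
def Claim_equal_state_from_history : Prop := ∀ (history : List String), Dom_state_from_history history → Pre_state_from_history history → Spec_state_from_history history (state_from_history history)

-- ===== LEMMAS AND PROOFS =====

def pvChar1 (s : String) : Char := (PySem.Str.pyGet? s 1).getD ' '

lemma pv_pair_zip : ∀ (l : List String),
    (List.range (l.length - 1)).map (fun k => (l.getD k "", l.getD (k + 1) "")) = l.zip (l.drop 1) := by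
  intro l
  induction l with
  | nil => simp
  | cons h t ih =>
    cases t with
    | nil => simp
    | cons h2 t2 =>
      have hlen : (h :: h2 :: t2).length - 1 = t2.length + 1 := by simp
      rw [hlen, List.range_succ_eq_map]
      simp only [List.map_cons, List.map_map]
      have htail : (List.range t2.length).map
          ((fun k => ((h :: h2 :: t2).getD k "", (h :: h2 :: t2).getD (k + 1) "")) ∘ (· + 1))
          = (List.range ((h2 :: t2).length - 1)).map
            (fun k => ((h2 :: t2).getD k "", (h2 :: t2).getD (k + 1) "")) := by
        simp [Function.comp]
      rw [htail, ih]
      simp [List.zip]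

lemma pv_filtermap_comp {α β γ : Type} (L : List α) (f : α → β) (q : β → Bool) (g : β → γ) :
    (L.filter (fun a => q (f a))).map (fun a => g (f a)) = ((L.map f).filter q).map g := by
  induction L with
  | nil => rfl
  | cons a L ih =>
    by_cases h : q (f a) = true <;> simp [h, ih]

lemma pv_moves_eq (l : List String) (ctx : String) :
    ((PySem.List.pyRange 0 ((l.length : Int) - 1) 1).filter
        (fun i => PySem.List.pyGetD l i "" == ctx)).map
        (fun i => (PySem.Str.pyGet? (PySem.List.pyGetD l (i + 1) "") 1).getD ' ')
      = ((l.zip (l.drop 1)).filter (fun p => p.1 == ctx)).map (fun p => pvChar1 p.2) := by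
  rw [PySem.List.pyRange_one]
  have hT : ((l.length : Int) - 1 - 0).toNat = l.length - 1 := by omega
  rw [hT, ← pv_filtermap_comp]
  have hstep : List.map (fun a : Nat => (PySem.Str.pyGet? (PySem.List.pyGetD l (0 + (a : Int) + 1) "") 1).getD ' ')
        (List.filter (fun a : Nat => PySem.List.pyGetD l (0 + (a : Int)) "" == ctx) (List.range (l.length - 1)))
      = List.map (fun k : Nat => pvChar1 (l.getD (k + 1) ""))
        (List.filter (fun k : Nat => l.getD k "" == ctx) (List.range (l.length - 1))) := by
    have hf : List.filter (fun a : Nat => PySem.List.pyGetD l (0 + (a : Int)) "" == ctx) (List.range (l.length - 1))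
        = List.filter (fun k : Nat => l.getD k "" == ctx) (List.range (l.length - 1)) :=
      List.filter_congr (by intro k _; simp)
    rw [hf]
    apply List.map_congr_left
    intro k _
    have h1 : (0 : Int) + (k : Int) + 1 = ((k + 1 : Nat) : Int) := by push_cast; ring
    rw [h1, PySem.List.pyGetD_natCast]; rfl
  rw [hstep]
  have h2 := pv_filtermap_comp (List.range (l.length - 1))
    (fun k => (l.getD k "", l.getD (k + 1) "")) (fun p => p.1 == ctx) (fun p => pvChar1 p.2)
  rw [pv_pair_zip] at h2
  exact h2

def pvTot (ctx : String) (Z : List (String × String)) : Int :=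
  ((Z.filter (fun p => p.1 == ctx)).length : Int)

def pvCnt (ctx : String) (Z : List (String × String)) : Int :=
  ((Z.filter (fun p => p.1 == ctx && (pvChar1 p.2 == 'C'))).length : Int)

lemma pvCnt_cons_self (p : String × String) (Z : List (String × String)) (ctx : String) (h : p.1 = ctx) :
    pvCnt ctx (p :: Z) = (if pvChar1 p.2 == 'C' then 1 else 0) + pvCnt ctx Z := by
  by_cases hc : pvChar1 p.2 = 'C'
  · simp [pvCnt, h, hc]; omega
  · simp [pvCnt, h, hc]

lemma pvCnt_cons_ne (p : String × String) (Z : List (String × String)) (ctx : String) (h : ¬ p.1 = ctx) :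
    pvCnt ctx (p :: Z) = pvCnt ctx Z := by
  simp [pvCnt, h]

lemma pvTot_cons_self (p : String × String) (Z : List (String × String)) (ctx : String) (h : p.1 = ctx) :
    pvTot ctx (p :: Z) = 1 + pvTot ctx Z := by
  simp [pvTot, h]; ring

lemma pvTot_cons_ne (p : String × String) (Z : List (String × String)) (ctx : String) (h : ¬ p.1 = ctx) :
    pvTot ctx (p :: Z) = pvTot ctx Z := by
  simp [pvTot, h]

lemma pv_insert_cc (a b c e v : Int × Int) :
    (PySem.Dict.mk [("CC", a), ("CD", b), ("DC", c), ("DD", e)]).insert "CC" v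
      = PySem.Dict.mk [("CC", v), ("CD", b), ("DC", c), ("DD", e)] := by
  apply PySem.Dict.ext
  rw [PySem.Dict.items_insert_of_contains (h := by simp)]
  simp

lemma pv_insert_cd (a b c e v : Int × Int) :
    (PySem.Dict.mk [("CC", a), ("CD", b), ("DC", c), ("DD", e)]).insert "CD" v
      = PySem.Dict.mk [("CC", a), ("CD", v), ("DC", c), ("DD", e)] := by
  apply PySem.Dict.ext
  rw [PySem.Dict.items_insert_of_contains (h := by simp)]
  simp

lemma pv_insert_dc (a b c e v : Int × Int) :
    (PySem.Dict.mk [("CC", a), ("CD", b), ("DC", c), ("DD", e)]).insert "DC" v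
      = PySem.Dict.mk [("CC", a), ("CD", b), ("DC", v), ("DD", e)] := by
  apply PySem.Dict.ext
  rw [PySem.Dict.items_insert_of_contains (h := by simp)]
  simp

lemma pv_insert_dd (a b c e v : Int × Int) :
    (PySem.Dict.mk [("CC", a), ("CD", b), ("DC", c), ("DD", e)]).insert "DD" v
      = PySem.Dict.mk [("CC", a), ("CD", b), ("DC", c), ("DD", v)] := by
  apply PySem.Dict.ext
  rw [PySem.Dict.items_insert_of_contains (h := by simp)]
  simp

lemma pv_getD_mk (a b c e : Int × Int) (k : String) :
    (PySem.Dict.mk [("CC", a), ("CD", b), ("DC", c), ("DD", e)]).getD k (0, 0)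
      = if k = "CC" then a else if k = "CD" then b else if k = "DC" then c
        else if k = "DD" then e else (0, 0) := by
  by_cases h1 : k = "CC"
  · subst h1; simp [PySem.Dict.getD_eq_get?_getD, PySem.Dict.get?_mk_cons]
  · by_cases h2 : k = "CD"
    · subst h2; simp [PySem.Dict.getD_eq_get?_getD, PySem.Dict.get?_mk_cons]
    · by_cases h3 : k = "DC"
      · subst h3; simp [PySem.Dict.getD_eq_get?_getD, PySem.Dict.get?_mk_cons]
      · by_cases h4 : k = "DD"
        · subst h4; simp [PySem.Dict.getD_eq_get?_getD, PySem.Dict.get?_mk_cons]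
        · have n1 : ("CC" == k) = false := beq_eq_false_iff_ne.mpr (Ne.symm h1)
          have n2 : ("CD" == k) = false := beq_eq_false_iff_ne.mpr (Ne.symm h2)
          have n3 : ("DC" == k) = false := beq_eq_false_iff_ne.mpr (Ne.symm h3)
          have n4 : ("DD" == k) = false := beq_eq_false_iff_ne.mpr (Ne.symm h4)
          simp [PySem.Dict.getD_eq_get?_getD, PySem.Dict.get?_mk_cons, n1, n2, n3, n4, h1, h2, h3, h4]
          rfl

lemma pv_B_fold (Z : List (String × String)) (a b c e : Int × Int) :
    Z.foldl
      (fun (d : PySem.Dict String (Int × Int)) p =>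
        if d.contains p.1 then
          d.insert p.1
            ((d.getD p.1 (0, 0)).1 + (if (PySem.Str.pyGet? p.2 1).getD ' ' == 'C' then 1 else 0),
             (d.getD p.1 (0, 0)).2 + 1)
        else d)
      (PySem.Dict.mk [("CC", a), ("CD", b), ("DC", c), ("DD", e)])
      = PySem.Dict.mk
          [("CC", (a.1 + pvCnt "CC" Z, a.2 + pvTot "CC" Z)),
           ("CD", (b.1 + pvCnt "CD" Z, b.2 + pvTot "CD" Z)),
           ("DC", (c.1 + pvCnt "DC" Z, c.2 + pvTot "DC" Z)),
           ("DD", (e.1 + pvCnt "DD" Z, e.2 + pvTot "DD" Z))] := by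
  induction Z generalizing a b c e with
  | nil => simp [pvCnt, pvTot]
  | cons p Z ih =>
    simp only [List.foldl_cons]
    by_cases h1 : p.1 = "CC"
    · rw [h1]
      rw [if_pos (by simp)]
      simp only [pv_getD_mk]
      simp only [String.reduceEq, reduceIte]
      rw [pv_insert_cc, ih]
      rw [pvCnt_cons_self p Z "CC" h1, pvTot_cons_self p Z "CC" h1,
          pvCnt_cons_ne p Z "CD" (by rw [h1]; decide), pvTot_cons_ne p Z "CD" (by rw [h1]; decide),
          pvCnt_cons_ne p Z "DC" (by rw [h1]; decide), pvTot_cons_ne p Z "DC" (by rw [h1]; decide),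
          pvCnt_cons_ne p Z "DD" (by rw [h1]; decide), pvTot_cons_ne p Z "DD" (by rw [h1]; decide)]
      simp [pvChar1]
      constructor <;> ring
    · by_cases h2 : p.1 = "CD"
      · rw [h2]
        rw [if_pos (by simp)]
        simp only [pv_getD_mk]
        simp only [String.reduceEq, reduceIte]
        rw [pv_insert_cd, ih]
        rw [pvCnt_cons_self p Z "CD" h2, pvTot_cons_self p Z "CD" h2,
            pvCnt_cons_ne p Z "CC" (by rw [h2]; decide), pvTot_cons_ne p Z "CC" (by rw [h2]; decide),
            pvCnt_cons_ne p Z "DC" (by rw [h2]; decide), pvTot_cons_ne p Z "DC" (by rw [h2]; decide),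
            pvCnt_cons_ne p Z "DD" (by rw [h2]; decide), pvTot_cons_ne p Z "DD" (by rw [h2]; decide)]
        simp [pvChar1]
        constructor <;> ring
      · by_cases h3 : p.1 = "DC"
        · rw [h3]
          rw [if_pos (by simp)]
          simp only [pv_getD_mk]
          simp only [String.reduceEq, reduceIte]
          rw [pv_insert_dc, ih]
          rw [pvCnt_cons_self p Z "DC" h3, pvTot_cons_self p Z "DC" h3,
              pvCnt_cons_ne p Z "CC" (by rw [h3]; decide), pvTot_cons_ne p Z "CC" (by rw [h3]; decide),
              pvCnt_cons_ne p Z "CD" (by rw [h3]; decide), pvTot_cons_ne p Z "CD" (by rw [h3]; decide),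
              pvCnt_cons_ne p Z "DD" (by rw [h3]; decide), pvTot_cons_ne p Z "DD" (by rw [h3]; decide)]
          simp [pvChar1]
          constructor <;> ring
        · by_cases h4 : p.1 = "DD"
          · rw [h4]
            rw [if_pos (by simp)]
            simp only [pv_getD_mk]
            simp only [String.reduceEq, reduceIte]
            rw [pv_insert_dd, ih]
            rw [pvCnt_cons_self p Z "DD" h4, pvTot_cons_self p Z "DD" h4,
                pvCnt_cons_ne p Z "CC" (by rw [h4]; decide), pvTot_cons_ne p Z "CC" (by rw [h4]; decide),
                pvCnt_cons_ne p Z "CD" (by rw [h4]; decide), pvTot_cons_ne p Z "CD" (by rw [h4]; decide),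
                pvCnt_cons_ne p Z "DC" (by rw [h4]; decide), pvTot_cons_ne p Z "DC" (by rw [h4]; decide)]
            simp [pvChar1]
            constructor <;> ring
          · rw [if_neg (by simp; exact ⟨fun h => h1 h.symm, fun h => h2 h.symm, fun h => h3 h.symm, fun h => h4 h.symm⟩)]
            rw [ih]
            rw [pvCnt_cons_ne p Z "CC" h1, pvTot_cons_ne p Z "CC" h1,
                pvCnt_cons_ne p Z "CD" h2, pvTot_cons_ne p Z "CD" h2,
                pvCnt_cons_ne p Z "DC" h3, pvTot_cons_ne p Z "DC" h3,
                pvCnt_cons_ne p Z "DD" h4, pvTot_cons_ne p Z "DD" h4]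

lemma pv_count_moves (Z : List (String × String)) (ctx : String) :
    ((((Z.filter (fun p => p.1 == ctx)).map (fun p => pvChar1 p.2)).filter
        (fun m => m == 'C')).length : Int) = pvCnt ctx Z := by
  unfold pvCnt
  congr 1
  induction Z with
  | nil => rfl
  | cons p Z ih =>
    by_cases h : p.1 = ctx
    · by_cases hc : pvChar1 p.2 = 'C' <;> simp [h, hc, ih]
    · simp [h, ih]

lemma pv_A_eq (l : List String) :
    state_from_history l
      = (["CC", "CD", "DC", "DD"] : List String).map
          (fun ctx => (ctx, pvCnt ctx (l.zip (l.drop 1)), pvTot ctx (l.zip (l.drop 1)))) := by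
  unfold state_from_history
  rw [PySem.Dict.items_foldl_insert_fresh (k := fun ctx => ctx) (hdis := by decide) (hnd := by decide)]
  simp only [PySem.Dict.empty, List.nil_append]
  apply List.map_congr_left
  intro ctx _
  rw [pv_moves_eq]
  rw [pv_count_moves]
  simp [pvTot]

lemma pv_B_eq (l : List String) :
    state_from_history_alt l
      = (["CC", "CD", "DC", "DD"] : List String).map
          (fun ctx => (ctx, pvCnt ctx (l.zip (l.drop 1)), pvTot ctx (l.zip (l.drop 1)))) := by
  unfold state_from_history_alt
  dsimp only
  rw [show PySem.List.slice l (some 1) none = l.drop 1 from by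
        rw [PySem.List.slice_from_one, List.drop_one]]
  rw [show (PySem.Dict.ofList [("CC", ((0 : Int), (0 : Int))), ("CD", (0, 0)), ("DC", (0, 0)), ("DD", (0, 0))])
        = PySem.Dict.mk [("CC", (0, 0)), ("CD", (0, 0)), ("DC", (0, 0)), ("DD", (0, 0))] from by decide]
  rw [pv_B_fold]
  simp

-- ===== VERDICT (by name: the statement is the Claim_ definition above) =====
theorem state_from_history_spec : Claim_equal_state_from_history := by
  intro history _ _
  unfold Spec_state_from_history
  rw [pv_A_eq, pv_B_eq]
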